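-- pv_equiv track=rewrite | github.com/slotrans/advent-of-code-2021 | other/15/puzzle15nwx.py | grid_from_input_p2
-- ===== SOURCE A (Python) =====
-- def grid_from_input_p1(input_string):
--     grid = []
--     for line in input_string.split("\n"):
--         grid.append([int(c) for c in line])
--     return grid
--
-- def wrap_1_to_9(n):
--     return (n-1) % 9 + 1
--
-- def increase_risk_level(risk_list):
--     return [wrap_1_to_9(x+1) for x in risk_list]
--
-- def grid_from_input_p2(input_string):
--     initial_grid = grid_from_input_p1(input_string)
--     y_size = len(initial_grid)
--     x_size = len(initial_grid[0])
--
--     # stretch each existing row to the right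
--     new_grid = []
--     for row in initial_grid:
--         new_row = row.copy()
--         temp_row = row.copy()
--         for _ in range(4):
--             temp_row = increase_risk_level(temp_row)
--             new_row += temp_row
--         new_grid.append(new_row)
--
--     # stretch those widened rows down
--     offset = 0
--     for _ in range(4):
--         for i in range(offset+0, offset+y_size):
--             new_row = increase_risk_level(new_grid[i])
--             new_grid.append(new_row)
--         offset += y_size
--
--     return new_grid
-- ===== SOURCE B (Python) =====
-- def grid_from_input_p2(input_string):
--     initial = [[int(c) for c in line] for line in input_string.split("\n")]
--     new_grid = []
--     for ty in range(5):
--         for row in initial: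
--             new_grid.append([c if tx + ty == 0 else (c + tx + ty - 1) % 9 + 1
--                              for tx in range(5) for c in row])
--     return new_grid
-- ===== Notes on version B (the rewrite author's own statement) =====
-- stated objective: simpler
-- what changed: Replaces the chained row-accumulation (stretch right by repeated increase_risk_level, then stretch down by indexed re-reads of the growing grid) with a direct per-cell closed form: tile (tx,ty) cell is (c+tx+ty-1)%9+1 (the original cell kept verbatim in tile (0,0)).
import Mathlib
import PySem

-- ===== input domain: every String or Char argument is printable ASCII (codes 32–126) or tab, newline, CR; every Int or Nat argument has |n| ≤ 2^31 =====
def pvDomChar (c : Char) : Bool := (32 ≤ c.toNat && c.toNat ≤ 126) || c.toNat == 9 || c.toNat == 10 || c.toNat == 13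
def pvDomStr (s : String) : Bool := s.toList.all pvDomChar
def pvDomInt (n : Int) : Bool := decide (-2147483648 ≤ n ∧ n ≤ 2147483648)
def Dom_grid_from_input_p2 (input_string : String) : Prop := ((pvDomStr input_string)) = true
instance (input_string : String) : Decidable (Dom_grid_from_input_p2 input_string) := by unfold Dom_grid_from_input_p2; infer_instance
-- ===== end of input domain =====

-- B replaces A's chained row-accumulation (stretch right by repeated increase_risk_level,
-- then stretch down by indexed re-reads of the growing grid) with a direct per-cell
-- closed form (c + tx + ty - 1) % 9 + 1 (original cell kept in tile (0,0)): simpler.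

-- ===== PORT A =====
def wrap_1_to_9 (n : Int) : Int := PySem.Int.mod (n - 1) 9 + 1

def increase_risk_level (risk_list : List Int) : List Int :=
  risk_list.map (fun x => wrap_1_to_9 (x + 1))

def grid_from_input_p1 (input_string : String) : List (List Int) :=
  (PySem.Chars.splitOn input_string.toList ['\n']).foldl
    (fun grid line => grid ++ [line.map (fun c => (PySem.Int.ofChars? [c]).getD 0)]) []

def grid_from_input_p2 (input_string : String) : List (List Int) :=
  let initial_grid := grid_from_input_p1 input_string
  let y_size : Int := initial_grid.length
  -- x_size = len(initial_grid[0]) is computed but never used in A; split("\n") always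
  -- yields at least one line, so the indexing never raises.
  let _x_size : Int := ((PySem.List.pyGet? initial_grid 0).getD []).length
  let new_grid := initial_grid.foldl (fun ng row =>
      let p := (List.range 4).foldl (fun (p : List Int × List Int) _ =>
          let temp_row := increase_risk_level p.2
          (p.1 ++ temp_row, temp_row)) (row, row)
      ng ++ [p.1]) []
  ((List.range 4).foldl (fun (st : List (List Int) × Int) _ =>
      let g := (PySem.List.pyRange st.2 (st.2 + y_size) 1).foldl
          (fun g i => g ++ [increase_risk_level ((PySem.List.pyGet? g i).getD [])]) st.1
      (g, st.2 + y_size)) (new_grid, 0)).1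

-- ===== PORT B =====
def grid_from_input_p2_alt (input_string : String) : List (List Int) :=
  let initial := (PySem.Chars.splitOn input_string.toList ['\n']).map
      (fun line => line.map (fun c => (PySem.Int.ofChars? [c]).getD 0))
  (List.range 5).flatMap (fun (ty : Nat) => initial.map (fun row =>
    (List.range 5).flatMap (fun (tx : Nat) => row.map (fun c =>
      if tx + ty = 0 then c else PySem.Int.mod (c + (tx : Int) + (ty : Int) - 1) 9 + 1))))

-- ===== PRECONDITION & SPEC =====
-- A raises ValueError on int(c) for any character that is not a decimal digit;
-- Pre_ admits exactly the inputs where every character is a digit or the '\n' separator.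
def Pre_grid_from_input_p2 (input_string : String) : Prop :=
  (input_string.toList.all (fun c => c == '\n' || ('0' ≤ c && c ≤ '9'))) = true
instance (input_string : String) : Decidable (Pre_grid_from_input_p2 input_string) := by
  unfold Pre_grid_from_input_p2; infer_instance

def pvWitness_grid_from_input_p2 : String := "12\n90"

def Spec_grid_from_input_p2 (input_string : String) (out : List (List Int)) : Prop :=
  out = grid_from_input_p2_alt input_string
instance (input_string : String) (out : List (List Int)) : Decidable (Spec_grid_from_input_p2 input_string out) := by
  unfold Spec_grid_from_input_p2; infer_instance

-- ===== CLAIM (what is proved, stated in full; the proofs are below) =====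
def Claim_equal_grid_from_input_p2 : Prop := ∀ (input_string : String), Dom_grid_from_input_p2 input_string → Pre_grid_from_input_p2 input_string → Spec_grid_from_input_p2 input_string (grid_from_input_p2 input_string)

-- ===== LEMMAS AND PROOFS =====

-- Python's % with the positive divisor 9 is Int.emod
theorem pv_mod9 (x : Int) : PySem.Int.mod x 9 = x % 9 :=
  PySem.Int.mod_eq_emod_of_pos (by norm_num)

-- the vertical-stretch inner loop: reading indices [off, off+len) of a grid it only appends to
theorem pv_pass (len : Nat) : ∀ (off : Int) (g : List (List Int)), 0 ≤ off →
    off.toNat + len ≤ g.length →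
    (PySem.List.pyRange off (off + (len : Int)) 1).foldl
      (fun g i => g ++ [increase_risk_level ((PySem.List.pyGet? g i).getD [])]) g
    = g ++ ((g.drop off.toNat).take len).map increase_risk_level := by
  induction len with
  | zero =>
      intro off g _ _
      simp
  | succ n ih =>
      intro off g hoff hlen
      have hofflt : off.toNat < g.length := by omega
      rw [PySem.List.pyRange_one_cons (by push_cast; omega)]
      rw [List.foldl_cons]
      have hget : PySem.List.pyGet? g off = some g[off.toNat] := by
        rw [PySem.List.pyGet?_of_nonneg g hoff]
        exact List.getElem?_eq_getElem hofflt
      rw [hget]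
      simp only [Option.getD_some]
      have hrange : off + ((n:Int) + 1) = (off + 1) + (n : Int) := by ring
      rw [show ((n+1 : Nat) : Int) = (n : Int) + 1 by push_cast; ring, hrange]
      rw [ih (off + 1) (g ++ [increase_risk_level g[off.toNat]]) (by omega)
            (by simp; omega)]
      have ht : (off + 1).toNat = off.toNat + 1 := by omega
      rw [ht]
      rw [List.drop_append_of_le_length (by omega)]
      rw [List.take_append_of_le_length (by simp [List.length_drop]; omega)]
      rw [List.drop_eq_getElem_cons hofflt, List.take_succ_cons, List.map_cons]
      simp

theorem pv_pass_full (g : List (List Int)) (off : Int) (len : Nat)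
    (hoff : 0 ≤ off) (h : off.toNat + len = g.length) :
    (PySem.List.pyRange off (off + (len : Int)) 1).foldl
      (fun g i => g ++ [increase_risk_level ((PySem.List.pyGet? g i).getD [])]) g
    = g ++ (g.drop off.toNat).map increase_risk_level := by
  rw [pv_pass len off g hoff (by omega)]
  rw [List.take_of_length_le (by simp [List.length_drop]; omega)]

-- the whole vertical stage: four passes, each appending the increased copy of the last block
theorem pv_vert (W : List (List Int)) (n : Nat) (hn : W.length = n) :
    (List.foldl (fun (st : List (List Int) × Int) _ =>
        (List.foldl (fun g i => g ++ [increase_risk_level ((PySem.List.pyGet? g i).getD [])]) st.1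
           (PySem.List.pyRange st.2 (st.2 + (n : Int)) 1),
         st.2 + (n : Int))) (W, 0) [0, 1, 2, 3]).1
    = W ++ W.map increase_risk_level
        ++ (W.map increase_risk_level).map increase_risk_level
        ++ ((W.map increase_risk_level).map increase_risk_level).map increase_risk_level
        ++ (((W.map increase_risk_level).map increase_risk_level).map increase_risk_level).map increase_risk_level := by
  simp only [List.foldl_cons, List.foldl_nil]
  rw [pv_pass_full W 0 n (by norm_num) (by omega)]
  simp only [Int.toNat_zero, List.drop_zero]
  rw [pv_pass_full (W ++ W.map increase_risk_level) ((0:Int) + (n:Int)) n (by omega)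
        (by simp [hn] <;> omega)]
  rw [show ((0:Int) + (n:Int)).toNat = n from by omega,
      List.drop_left' (by simp [hn])]
  rw [pv_pass_full (W ++ W.map increase_risk_level ++ (W.map increase_risk_level).map increase_risk_level)
        ((0:Int) + (n:Int) + (n:Int)) n (by omega) (by simp [hn] <;> omega)]
  rw [show ((0:Int) + (n:Int) + (n:Int)).toNat = n + n from by omega]
  rw [show W ++ W.map increase_risk_level ++ (W.map increase_risk_level).map increase_risk_level
        = (W ++ W.map increase_risk_level) ++ (W.map increase_risk_level).map increase_risk_level from rfl,
      List.drop_left' (by simp [hn])]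
  rw [pv_pass_full ((W ++ W.map increase_risk_level) ++ (W.map increase_risk_level).map increase_risk_level
          ++ ((W.map increase_risk_level).map increase_risk_level).map increase_risk_level)
        ((0:Int) + (n:Int) + (n:Int) + (n:Int)) n (by omega) (by simp [hn] <;> omega)]
  rw [show ((0:Int) + (n:Int) + (n:Int) + (n:Int)).toNat = n + n + n from by omega]
  rw [show (W ++ W.map increase_risk_level) ++ (W.map increase_risk_level).map increase_risk_level
          ++ ((W.map increase_risk_level).map increase_risk_level).map increase_risk_level
        = ((W ++ W.map increase_risk_level) ++ (W.map increase_risk_level).map increase_risk_level)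
          ++ ((W.map increase_risk_level).map increase_risk_level).map increase_risk_level from rfl,
      List.drop_left' (by simp [hn] <;> omega)]

-- ===== VERDICT (by name: the statement is the Claim_ definition above) =====
theorem grid_from_input_p2_spec : Claim_equal_grid_from_input_p2 := by
  intro s _ _
  unfold Spec_grid_from_input_p2
  unfold grid_from_input_p2 grid_from_input_p2_alt grid_from_input_p1
  simp only [PySem.List.foldl_append_singleton_eq_map, List.nil_append]
  rw [show (fun line => List.map (fun c => (PySem.Int.ofChars? [c]).getD 0) line)
        = List.map (fun c => (PySem.Int.ofChars? [c]).getD 0) from rfl]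
  rw [show List.range 4 = [0, 1, 2, 3] from by decide,
      show List.range 5 = [0, 1, 2, 3, 4] from by decide]
  rw [pv_vert _ _ (List.length_map _)]
  simp only [List.foldl_cons, List.foldl_nil, List.flatMap_cons, List.flatMap_nil,
             List.append_nil]
  simp only [List.map_map, List.append_assoc]
  refine congrArg₂ _ ?_ (congrArg₂ _ ?_ (congrArg₂ _ ?_ (congrArg₂ _ ?_ ?_))) <;>
    (refine List.map_congr_left (fun x _ => ?_) ;
     simp only [Function.comp_apply, increase_risk_level, List.map_map, List.map_append,
                List.append_assoc] ;
     refine congrArg₂ _ ?_ (congrArg₂ _ ?_ (congrArg₂ _ ?_ (congrArg₂ _ ?_ ?_))) <;>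
       first
       | rfl
       | (simp; done)
       | (refine List.map_congr_left (fun c _ => ?_) ;
          simp only [Function.comp_apply, wrap_1_to_9, pv_mod9] ;
          simp <;> omega))
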